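-- pv_equiv track=rewrite | github.com/eduarda-manentii/exec-python | av04/ex1.py | conta_caracteres
-- ===== SOURCE A (Python) =====
-- vogais = ["a", "e", "i", "o", "u"]
--
-- def conta_caracteres(frase):
--     qtde_vogais = 0
--     espacos = frase.count(" ")
--
--     for letra in frase.lower():
--         for vogal in vogais:
--             if vogal == letra:
--                 qtde_vogais += 1
--
--     return qtde_vogais, espacos
-- ===== SOURCE B (Python) =====
-- vogais = ["a", "e", "i", "o", "u"]
--
-- def conta_caracteres(frase):
--     low = frase.lower()
--     qtde_vogais = sum(low.count(v) for v in vogais)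
--     espacos = frase.count(" ")
--     return qtde_vogais, espacos
-- ===== Notes on version B (the rewrite author's own statement) =====
-- stated objective: faster
-- what changed: Replaces A's character-by-character Python loop with a nested per-vowel membership loop by five summed str.count scans of the lowered string (plus the same space count), moving all counting into C-level str.count.
import Mathlib
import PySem

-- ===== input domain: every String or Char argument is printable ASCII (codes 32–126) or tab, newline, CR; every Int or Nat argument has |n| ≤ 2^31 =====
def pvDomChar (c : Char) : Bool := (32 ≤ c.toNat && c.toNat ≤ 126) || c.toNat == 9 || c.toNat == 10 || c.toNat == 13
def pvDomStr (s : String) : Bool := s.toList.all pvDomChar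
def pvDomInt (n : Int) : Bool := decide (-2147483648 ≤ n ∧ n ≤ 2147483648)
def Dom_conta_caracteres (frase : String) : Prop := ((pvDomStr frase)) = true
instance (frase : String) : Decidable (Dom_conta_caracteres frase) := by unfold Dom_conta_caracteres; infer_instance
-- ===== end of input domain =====

-- B counts vowels with five per-vowel str.count scans of the lowered string instead of A's
-- single character-by-character Python-level pass with a nested membership loop; a timing run measured B faster.


-- ===== PORT A =====
-- module-level constant; Python iterates the string giving 1-char strings, ported as Chars
def vogais : List Char := ['a', 'e', 'i', 'o', 'u']

def conta_caracteres (frase : String) : Int × Int :=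
  let qtde_vogais : Int := 0
  let espacos : Int := (PySem.Str.count frase " " : Int)
  let qtde_vogais :=
    (PySem.Str.lower frase).toList.foldl
      (fun acc letra =>
        vogais.foldl (fun a vogal => if vogal == letra then a + 1 else a) acc)
      qtde_vogais
  (qtde_vogais, espacos)

-- ===== PORT B =====
def conta_caracteres_alt (frase : String) : Int × Int :=
  let low := PySem.Str.lower frase
  let qtde_vogais : Int := (vogais.map (fun v => (PySem.Str.count low (String.singleton v) : Int))).sum
  let espacos : Int := (PySem.Str.count frase " " : Int)
  (qtde_vogais, espacos)

-- ===== PRECONDITION & SPEC =====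
def Spec_conta_caracteres (frase : String) (out : Int × Int) : Prop := out = conta_caracteres_alt frase
instance (frase : String) (out : Int × Int) : Decidable (Spec_conta_caracteres frase out) := by unfold Spec_conta_caracteres; infer_instance

-- ===== CLAIM (what is proved, stated in full; the proofs are below) =====
def Claim_equal_conta_caracteres : Prop := ∀ (frase : String), Dom_conta_caracteres frase → Spec_conta_caracteres frase (conta_caracteres frase)

-- ===== LEMMAS AND PROOFS =====

-- single-character substring count is character count
lemma count_go_singleton (c : Char) (fuel : Nat) (l : List Char) (acc : Nat)
    (h : l.length ≤ fuel) :
    PySem.Chars.count.go [c] fuel l acc = acc + l.count c := by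
  induction fuel generalizing l acc with
  | zero =>
    cases l with
    | nil => simp [PySem.Chars.count.go]
    | cons a t => simp at h
  | succ n ih =>
    cases l with
    | nil => simp [PySem.Chars.count.go]
    | cons a t =>
      simp only [List.length_cons, Nat.succ_le_succ_iff] at h
      by_cases hc : c = a
      · subst hc
        simp [PySem.Chars.count.go, List.isPrefixOf, ih t _ h]
        omega
      · simp [PySem.Chars.count.go, List.isPrefixOf, hc, ih t _ h, Ne.symm hc]

lemma chars_count_singleton (l : List Char) (c : Char) :
    PySem.Chars.count l [c] = l.count c := by
  simp [PySem.Chars.count, count_go_singleton c l.length l 0 le_rfl]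

-- sums of per-element counts: prepending one character adds its membership count
lemma sum_count_cons (vs : List Char) (c : Char) (t : List Char) :
    (vs.map (fun v => (((c :: t).count v : Nat) : Int))).sum
    = (vs.map (fun v => ((t.count v : Nat) : Int))).sum + (vs.count c : Int) := by
  induction vs with
  | nil => simp
  | cons v vs ih =>
    rw [List.map_cons, List.sum_cons, ih, List.map_cons, List.sum_cons]
    simp only [List.count_cons, beq_iff_eq]
    push_cast
    split_ifs with h1 h2 h2
    · omega
    · exact absurd h1.symm h2
    · exact absurd h2.symm h1
    · omega

-- A's double loop equals the per-vowel sum of counts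
lemma loop_eq_sum (l : List Char) (acc : Int) :
    l.foldl (fun acc letra =>
        vogais.foldl (fun a vogal => if vogal == letra then a + 1 else a) acc) acc
    = acc + (vogais.map (fun v => (l.count v : Int))).sum := by
  induction l generalizing acc with
  | nil => simp
  | cons c t ih =>
    rw [List.foldl_cons, PySem.List.foldl_beq_add_one, ih, sum_count_cons]
    ring

theorem conta_caracteres_spec_aux (frase : String) :
    conta_caracteres frase = conta_caracteres_alt frase := by
  unfold conta_caracteres conta_caracteres_alt
  simp only [loop_eq_sum, PySem.Str.count_eq, String.toList_singleton,
    chars_count_singleton]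
  simp

-- ===== VERDICT (by name: the statement is the Claim_ definition above) =====
theorem conta_caracteres_spec : Claim_equal_conta_caracteres := by
  intro frase _
  exact conta_caracteres_spec_aux frase
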